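-- pv_equiv track=rewrite | github.com/y3nxy/color | color.py | scale_text
-- ===== SOURCE A (Python) =====
-- def scale_text(lines, term_width, term_height):
--     orig_height = len(lines)
--     orig_width = max(len(line) for line in lines)
--     v_scale = max(1, term_height // orig_height)
--     h_scale = max(1, term_width // orig_width)
--     scale = min(v_scale, h_scale)
--
--     scaled_lines = []
--     for line in lines:
--         new_line = "".join(char * scale for char in line)
--         for _ in range(scale):
--             scaled_lines.append(new_line[:term_width])
--     return scaled_lines[:term_height]
-- ===== SOURCE B (Python) =====
-- def scale_text(lines, term_width, term_height):
--     orig_height = len(lines)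
--     orig_width = max(len(line) for line in lines)
--     scale = min(max(1, term_height // orig_height),
--                 max(1, term_width // orig_width))
--     return [
--         "".join(lines[r // scale][c // scale]
--                 for c in range(scale * len(lines[r // scale])))[:term_width]
--         for r in range(scale * orig_height)
--     ][:term_height]
-- ===== Notes on version B (the rewrite author's own statement) =====
-- stated objective: alternative
-- what changed: A builds each scaled row by repeating characters (char*scale) and repeating whole rows in an inner loop; B instead generates every output cell by nearest-neighbor coordinate mapping, indexing lines[r//scale][c//scale] over ranges of output row/column indices.
import Mathlib
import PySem

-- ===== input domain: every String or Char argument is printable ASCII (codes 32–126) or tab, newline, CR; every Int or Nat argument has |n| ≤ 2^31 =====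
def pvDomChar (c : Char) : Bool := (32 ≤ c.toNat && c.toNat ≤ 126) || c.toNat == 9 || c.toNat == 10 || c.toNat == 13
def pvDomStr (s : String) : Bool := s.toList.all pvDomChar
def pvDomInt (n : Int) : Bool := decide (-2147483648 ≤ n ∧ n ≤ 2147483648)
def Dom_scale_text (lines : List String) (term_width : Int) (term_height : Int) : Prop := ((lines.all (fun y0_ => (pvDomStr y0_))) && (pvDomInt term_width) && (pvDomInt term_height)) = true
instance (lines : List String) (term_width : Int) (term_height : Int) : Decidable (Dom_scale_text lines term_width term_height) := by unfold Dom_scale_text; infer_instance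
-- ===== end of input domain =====

-- B rebuilds the scaled picture by nearest-neighbour coordinate mapping (output cell (r,c) ← source cell (r//scale, c//scale))
-- instead of A's repetition loops; objective: alternative algorithm of the same cost, return value proved identical.

-- ===== PORT A =====
def scale_text (lines : List String) (term_width : Int) (term_height : Int) : List String :=
  let orig_height : Int := PySem.List.len lines
  let orig_width : Int := ((PySem.List.max? (lines.map PySem.Str.len) id).getD 0)  -- max(...) ; Pre_ excludes the empty generator (ValueError)
  let v_scale : Int := max 1 (PySem.Int.floordiv term_height orig_height)
  let h_scale : Int := max 1 (PySem.Int.floordiv term_width orig_width)           -- Pre_ excludes orig_width = 0 (ZeroDivisionError)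
  let scale : Int := min v_scale h_scale
  let scaled_lines : List String := lines.foldl (fun acc line =>
    let new_line : List Char := line.toList.flatMap (fun ch => List.replicate scale.toNat ch)  -- "".join(char * scale …); scale ≥ 1
    acc ++ List.replicate scale.toNat (String.mk (PySem.List.slice new_line none (some term_width)))) []
  PySem.List.slice scaled_lines none (some term_height)

-- ===== PORT B =====
def scale_text_alt (lines : List String) (term_width : Int) (term_height : Int) : List String :=
  let orig_height : Int := PySem.List.len lines
  let orig_width : Int := ((PySem.List.max? (lines.map PySem.Str.len) id).getD 0)
  let scale : Int := min (max 1 (PySem.Int.floordiv term_height orig_height))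
                         (max 1 (PySem.Int.floordiv term_width orig_width))
  PySem.List.slice
    ((PySem.List.pyRange 0 (scale * orig_height)).map (fun r =>
      let src : List Char := (PySem.List.pyGetD lines (PySem.Int.floordiv r scale) "").toList
      String.mk (PySem.List.slice
        ((PySem.List.pyRange 0 (scale * PySem.List.len src)).map
          (fun c => PySem.List.pyGetD src (PySem.Int.floordiv c scale) ' '))
        none (some term_width))))
    none (some term_height)

-- ===== PRECONDITION & SPEC =====
-- Pre_ excludes exactly the inputs on which Python A raises: an empty lines list (ValueError from max())
-- and all-empty lines (ZeroDivisionError from term_width // 0).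
def Pre_scale_text (lines : List String) (term_width : Int) (term_height : Int) : Prop :=
  ∃ l ∈ lines, l ≠ ""
instance (lines : List String) (term_width : Int) (term_height : Int) : Decidable (Pre_scale_text lines term_width term_height) := by unfold Pre_scale_text; infer_instance
def pvWitness_scale_text : List String × Int × Int := (["ab", "c"], 5, 4)

def Spec_scale_text (lines : List String) (term_width : Int) (term_height : Int) (out : List String) : Prop := out = scale_text_alt lines term_width term_height
instance (lines : List String) (term_width : Int) (term_height : Int) (out : List String) : Decidable (Spec_scale_text lines term_width term_height out) := by unfold Spec_scale_text; infer_instance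

-- ===== CLAIM (what is proved, stated in full; the proofs are below) =====
def Claim_equal_scale_text : Prop := ∀ (lines : List String) (term_width : Int) (term_height : Int), Dom_scale_text lines term_width term_height → Pre_scale_text lines term_width term_height → Spec_scale_text lines term_width term_height (scale_text lines term_width term_height)

-- ===== LEMMAS AND PROOFS =====

-- nearest-neighbour index map = s-fold repetition: the heart of the equivalence
theorem pv_nn_map {α β : Type} (s : Nat) (hs : 0 < s) (d : α) (F : α → β) :
    ∀ (xs : List α),
    (List.range (s * xs.length)).map (fun i => F (xs.getD (i / s) d))
      = xs.flatMap (fun x => List.replicate s (F x)) := by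
  intro xs
  induction xs with
  | nil => simp
  | cons a t ih =>
    have hlen : s * (a :: t).length = s + s * t.length := by
      simp [List.length_cons]; ring
    rw [hlen, List.range_add, List.map_append, List.map_map]
    have h1 : (List.range s).map (fun i => F ((a :: t).getD (i / s) d))
        = List.replicate s (F a) := by
      apply List.ext_getElem
      · simp
      · intro i hi _
        have hlt : i < s := by simpa using hi
        have : i / s = 0 := Nat.div_eq_of_lt hlt
        simp [this]
    have h2 : (List.range (s * t.length)).map
          ((fun i => F ((a :: t).getD (i / s) d)) ∘ (fun x => s + x))
        = (List.range (s * t.length)).map (fun i => F (t.getD (i / s) d)) := by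
      apply List.map_congr_left
      intro i _
      have : (s + i) / s = i / s + 1 := by
        rw [Nat.add_comm, Nat.add_div_right _ hs]
      simp [Function.comp, this]
    rw [h1, h2, ih]
    simp [List.flatMap_cons]

theorem scale_text_eq_alt (lines : List String) (term_width term_height : Int) :
    scale_text lines term_width term_height = scale_text_alt lines term_width term_height := by
  unfold scale_text scale_text_alt
  simp only []
  set ow : Int := ((PySem.List.max? (lines.map PySem.Str.len) id).getD 0) with how
  set sc : Int := min (max 1 (PySem.Int.floordiv term_height (PySem.List.len lines)))
                      (max 1 (PySem.Int.floordiv term_width ow)) with hsc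
  have hsc1 : 1 ≤ sc := le_min (le_max_left _ _) (le_max_left _ _)
  have hscnat : sc = ((sc.toNat : Nat) : Int) := (Int.toNat_of_nonneg (by omega)).symm
  have hspos : 0 < sc.toNat := by omega
  set s : Nat := sc.toNat with hs
  congr 1
  -- rows: foldl-append = flatMap, then the nearest-neighbour map lemma, twice
  rw [PySem.List.foldl_append_eq_flatMap, List.nil_append]
  have houter : sc * PySem.List.len lines = ((s * lines.length : Nat) : Int) := by
    rw [hscnat]; simp [PySem.List.len]
  rw [houter, PySem.List.pyRange_zero_natCast, List.map_map]
  have hbody : ∀ i : Nat,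
      ((fun r =>
        let src : List Char := (PySem.List.pyGetD lines (PySem.Int.floordiv r sc) "").toList
        String.mk (PySem.List.slice
          ((PySem.List.pyRange 0 (sc * PySem.List.len src)).map
            (fun c => PySem.List.pyGetD src (PySem.Int.floordiv c sc) ' '))
          none (some term_width))) ∘ (fun k : Nat => (k : Int))) i
      = (fun line : String =>
          String.mk (PySem.List.slice
            (line.toList.flatMap (fun ch => List.replicate s ch)) none (some term_width)))
          (lines.getD (i / s) "") := by
    intro i
    simp only [Function.comp]
    rw [hscnat]
    rw [PySem.Int.floordiv_natCast, PySem.List.pyGetD_natCast]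
    set src : List Char := (lines.getD (i / s) "").toList with hsrc
    have hinner : ((s : Int)) * PySem.List.len src = ((s * src.length : Nat) : Int) := by
      simp [PySem.List.len]
    rw [hinner, PySem.List.pyRange_zero_natCast, List.map_map]
    congr 1
    have : ∀ c : Nat,
        ((fun c : Int => PySem.List.pyGetD src (PySem.Int.floordiv c (s : Int)) ' ') ∘
          (fun k : Nat => (k : Int))) c
        = (fun c : Nat => id (src.getD (c / s) ' ')) c := by
      intro c
      simp only [Function.comp, id]
      rw [PySem.Int.floordiv_natCast, PySem.List.pyGetD_natCast]
    rw [List.map_congr_left (fun c _ => this c)]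
    rw [pv_nn_map s hspos ' ' id src]
    simp
  rw [List.map_congr_left (fun i _ => hbody i)]
  exact (pv_nn_map s hspos ""
    (fun line : String =>
      String.mk (PySem.List.slice
        (line.toList.flatMap (fun ch => List.replicate s ch)) none (some term_width))) lines).symm

-- ===== VERDICT (by name: the statement is the Claim_ definition above) =====
theorem scale_text_spec : Claim_equal_scale_text := by
  intro lines tw th _ _
  unfold Spec_scale_text
  exact scale_text_eq_alt lines tw th
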